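-- pv_equiv track=rewrite | github.com/pokm321/programmers-baekjoon | Python3/프로그래머스/3/340210. ［PCCP 기출문제］ 4번 ／ 수식 복원하기/［PCCP 기출문제］ 4번 ／ 수식 복원하기.py | is_working
-- ===== SOURCE A (Python) =====
-- def is_working(base, expressions):
--     for expression in expressions:
--         if not "X" in expression:
--             num1, operator, num2, equal, num3 = expression.split(" ")
--
--             num_bases = []
--             for num in [num1, num2, num3]:
--                 num_base = 0
--                 for i, n in enumerate(reversed(num)):
--                     num_base += int(n) * (int(base)**i)
--                 num_bases.append(num_base)
--
--             if operator == "+" and num_bases[0] + num_bases[1] != num_bases[2]: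
--                 return False
--             elif operator == "-" and num_bases[0] - num_bases[1] != num_bases[2]:
--                 return False
--
--     return True
-- ===== SOURCE B (Python) =====
-- def _check(base, expression):
--     if "X" in expression:
--         return True
--     a, op, b, _eq, c = expression.split(" ")
--     if op != "+" and op != "-":
--         return True
--     sign = 1 if op == "+" else -1
--     width = max(len(a), len(b), len(c))
--     acc = 0
--     for da, db, dc in zip(a.rjust(width, "0"), b.rjust(width, "0"), c.rjust(width, "0")):
--         acc = acc * base + (int(da) + sign * int(db) - int(dc))
--     return acc == 0
--
-- def is_working(base, expressions):
--     return all(_check(base, e) for e in expressions)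
-- ===== Notes on version B (the rewrite author's own statement) =====
-- stated objective: alternative
-- what changed: B never converts an operand to a value: it right-pads the three digit strings to equal width and verifies each equation in one pass over the aligned digit triples, folding the signed digit-wise differences into a single accumulator and testing it for zero.
import Mathlib
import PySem

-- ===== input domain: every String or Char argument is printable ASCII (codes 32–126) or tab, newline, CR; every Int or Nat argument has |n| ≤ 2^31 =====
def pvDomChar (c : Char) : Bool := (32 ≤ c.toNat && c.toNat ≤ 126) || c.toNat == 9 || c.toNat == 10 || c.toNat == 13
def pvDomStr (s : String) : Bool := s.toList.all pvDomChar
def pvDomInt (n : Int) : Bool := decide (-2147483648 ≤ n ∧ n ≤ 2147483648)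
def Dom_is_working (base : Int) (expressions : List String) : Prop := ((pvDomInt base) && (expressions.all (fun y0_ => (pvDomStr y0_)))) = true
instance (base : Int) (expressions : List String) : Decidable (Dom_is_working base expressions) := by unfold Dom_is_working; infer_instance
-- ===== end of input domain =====

-- B verifies each equation without converting any operand to a value: the three digit
-- strings are padded to equal width and a single accumulator folds the signed
-- digit-wise differences, which must end at zero; same return value on Pre_.

-- int(ch) for a single character, defaulting to 0 where Python raises (excluded by Pre_)
def chInt (c : Char) : Int := (PySem.Int.ofChars? [c]).getD 0

-- ===== PORT A =====
-- inner loop: for i, n in enumerate(reversed(num)): num_base += int(n) * int(base)**i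
def aNumBase (base : Int) (num : List Char) : Int :=
  (PySem.List.enumerate num.reverse 0).foldl
    (fun acc p => acc + chInt p.2 * base ^ p.1.toNat) 0

def aLoop (base : Int) : List String → Bool
  | [] => true
  | e :: rest =>
    if 'X' ∈ e.toList then aLoop base rest
    else
      match PySem.Chars.splitOn e.toList [' '] with
      | [num1, operator, num2, _equal, num3] =>
        let num_bases := ([num1, num2, num3]).foldl (fun acc num => acc ++ [aNumBase base num]) []
        let g0 := (PySem.List.pyGet? num_bases (0 : Int)).getD 0
        let g1 := (PySem.List.pyGet? num_bases (1 : Int)).getD 0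
        let g2 := (PySem.List.pyGet? num_bases (2 : Int)).getD 0
        if operator == ['+'] && !(g0 + g1 == g2) then false
        else if operator == ['-'] && !(g0 - g1 == g2) then false
        else aLoop base rest
      | _ => false   -- Python raises ValueError on unpacking; excluded by Pre_

def is_working (base : Int) (expressions : List String) : Bool :=
  aLoop base expressions

-- ===== PORT B =====
-- s.rjust(width, "0"), exact for ASCII digit strings: pad on the left, or return s unchanged if already wide enough
def bRjust (width : Nat) (s : List Char) : List Char :=
  List.replicate (width - s.length) '0' ++ s

def bCheck (base : Int) (a op b c : List Char) : Bool :=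
  if !(op == ['+']) && !(op == ['-']) then true
  else
    let sign : Int := if op == ['+'] then 1 else -1
    let width := max a.length (max b.length c.length)
    (((bRjust width a).zip ((bRjust width b).zip (bRjust width c))).foldl
      (fun acc t => acc * base + (chInt t.1 + sign * chInt t.2.1 - chInt t.2.2)) 0) == 0

def bHolds (base : Int) (e : String) : Bool :=
  if 'X' ∈ e.toList then true
  else
    match PySem.Chars.splitOn e.toList [' '] with
    | [a, op, b, _eq, c] => bCheck base a op b c
    | _ => false   -- Python raises ValueError on unpacking; excluded by Pre_

def is_working_alt (base : Int) (expressions : List String) : Bool :=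
  expressions.all (bHolds base)

-- ===== PRECONDITION & SPEC =====
-- exactly where Python A returns: every X-free expression splits into 5 fields whose
-- 1st, 3rd and 5th fields are all decimal digits (int(ch) raises otherwise)
def Pre_is_working (base : Int) (expressions : List String) : Prop :=
  ∀ e ∈ expressions, ('X' ∈ e.toList) ∨
    ((PySem.Chars.splitOn e.toList [' ']).length = 5 ∧
     ∀ i ∈ [0, 2, 4], ∀ c ∈ (PySem.Chars.splitOn e.toList [' ']).getD i [],
       PySem.Chars.isdigit c = true)
instance (base : Int) (expressions : List String) : Decidable (Pre_is_working base expressions) := by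
  unfold Pre_is_working; infer_instance

def pvWitness_is_working : Int × List String := (2, ["X + 1 = 1"])

def Spec_is_working (base : Int) (expressions : List String) (out : Bool) : Prop := out = is_working_alt base expressions
instance (base : Int) (expressions : List String) (out : Bool) : Decidable (Spec_is_working base expressions out) := by unfold Spec_is_working; infer_instance

-- ===== CLAIM (what is proved, stated in full; the proofs are below) =====
def Claim_equal_is_working : Prop := ∀ (base : Int) (expressions : List String), Dom_is_working base expressions → Pre_is_working base expressions → Spec_is_working base expressions (is_working base expressions)

-- ===== LEMMAS AND PROOFS =====

-- plain Horner value of a digit string, used only in the proofs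
def hv (base : Int) (l : List Char) : Int :=
  l.foldl (fun v c => v * base + chInt c) 0

-- any Horner-shaped fold factors its accumulator out as v * base^len
theorem horner_shift {α : Type} (base : Int) (g : α → Int) (l : List α) (v : Int) :
    l.foldl (fun acc x => acc * base + g x) v
      = v * base ^ l.length + l.foldl (fun acc x => acc * base + g x) 0 := by
  induction l generalizing v with
  | nil => simp
  | cons x l ih =>
    simp only [List.foldl_cons, List.length_cons]
    rw [ih (v * base + g x), ih (0 * base + g x)]
    ring

-- A's positional sum shifts additively in its accumulator
theorem aFold_shift (base : Int) (l : List (Int × Char)) (v : Int) :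
    l.foldl (fun acc p => acc + chInt p.2 * base ^ p.1.toNat) v
      = v + l.foldl (fun acc p => acc + chInt p.2 * base ^ p.1.toNat) 0 := by
  induction l generalizing v with
  | nil => simp
  | cons q l ih =>
    simp only [List.foldl_cons]
    rw [ih (v + chInt q.2 * base ^ q.1.toNat), ih (0 + chInt q.2 * base ^ q.1.toNat)]
    ring

-- A's reversed positional sum is the Horner value
theorem aNumBase_eq_hv (base : Int) (num : List Char) : aNumBase base num = hv base num := by
  unfold aNumBase hv
  induction num with
  | nil => simp
  | cons c l ih =>
    have hrev : (c :: l).reverse = l.reverse ++ [c] := by simp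
    rw [hrev, PySem.List.enumerate_append, List.foldl_append]
    rw [aFold_shift base (PySem.List.enumerate [c] (0 + ↑l.reverse.length)) _]
    have h1 : (PySem.List.enumerate [c] (0 + ↑l.reverse.length)).foldl
        (fun acc p => acc + chInt p.2 * base ^ p.1.toNat) 0
        = chInt c * base ^ l.length := by
      simp [PySem.List.enumerate]
    rw [h1, ih]
    rw [List.foldl_cons, horner_shift base chInt l (0 * base + chInt c)]
    ring

-- leading zeros do not change the Horner value
theorem hv_rjust (base : Int) (w : Nat) (l : List Char) : hv base (bRjust w l) = hv base l := by
  unfold hv bRjust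
  rw [List.foldl_append]
  have h0 : ∀ k, (List.replicate k '0').foldl (fun v c => v * base + chInt c) 0 = 0 := by
    intro k
    induction k with
    | zero => rfl
    | succ k ih => simpa [List.replicate_succ, chInt, PySem.Int.ofChars?] using ih
  rw [h0]

-- the combined fold over aligned digit triples computes hv x + s*hv y - hv z
theorem comb_eq (base s : Int) (x y z : List Char)
    (hy : y.length = x.length) (hz : z.length = x.length) :
    (x.zip (y.zip z)).foldl
      (fun acc t => acc * base + (chInt t.1 + s * chInt t.2.1 - chInt t.2.2)) 0
      = hv base x + s * hv base y - hv base z := by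
  induction x generalizing y z with
  | nil =>
    cases y with
    | nil => cases z with
      | nil => simp [hv]
      | cons _ _ => simp at hz
    | cons _ _ => simp at hy
  | cons a xs ih =>
    cases y with
    | nil => simp at hy
    | cons b ys =>
      cases z with
      | nil => simp at hz
      | cons c zs =>
        simp only [List.length_cons] at hy hz
        have hy' : ys.length = xs.length := by omega
        have hz' : zs.length = xs.length := by omega
        have hzip : (xs.zip (ys.zip zs)).length = xs.length := by
          simp [List.length_zip, hy', hz']
        simp only [List.zip_cons_cons, List.foldl_cons]
        rw [horner_shift base _ (xs.zip (ys.zip zs)) _, hzip, ih ys zs hy' hz']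
        unfold hv
        rw [List.foldl_cons, horner_shift base chInt xs (0 * base + chInt a),
            List.foldl_cons, horner_shift base chInt ys (0 * base + chInt b), hy',
            List.foldl_cons, horner_shift base chInt zs (0 * base + chInt c), hz']
        ring

-- bCheck decides hv a ± hv b = hv c
theorem bCheck_eq (base : Int) (a op b c : List Char) :
    bCheck base a op b c =
      (if op == ['+'] then decide (hv base a + hv base b = hv base c)
       else if op == ['-'] then decide (hv base a - hv base b = hv base c)
       else true) := by
  have hlen : ∀ w l, l.length ≤ w → (bRjust w l).length = w := by
    intro w l h; simp [bRjust]; omega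
  unfold bCheck
  set w := max a.length (max b.length c.length) with hw
  by_cases hp : op == ['+']
  · rw [if_neg (by simp [hp]), if_pos hp]
    simp only []
    rw [comb_eq base 1 (bRjust w a) (bRjust w b) (bRjust w c)
        (by rw [hlen w b (by omega), hlen w a (by omega)])
        (by rw [hlen w c (by omega), hlen w a (by omega)])]
    rw [hv_rjust, hv_rjust, hv_rjust]
    by_cases he : hv base a + hv base b = hv base c
    · simp [hp, he]
    · rw [if_pos hp]
      simp only [he, decide_false]
      rw [beq_eq_false_iff_ne]
      omega
  · by_cases hm : op == ['-']
    · rw [if_neg (by simp [hm]), if_neg hp, if_pos hm]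
      simp only []
      rw [comb_eq base (-1) (bRjust w a) (bRjust w b) (bRjust w c)
          (by rw [hlen w b (by omega), hlen w a (by omega)])
          (by rw [hlen w c (by omega), hlen w a (by omega)])]
      rw [hv_rjust, hv_rjust, hv_rjust]
      by_cases he : hv base a - hv base b = hv base c
      · simp [hp, he]
        omega
      · rw [if_neg hp]
        simp only [he, decide_false]
        rw [beq_eq_false_iff_ne]
        omega
    · simp [hp, hm]

theorem loop_eq (base : Int) (es : List String) : aLoop base es = es.all (bHolds base) := by
  induction es with
  | nil => rfl
  | cons e rest ih =>
    rw [List.all_cons, ← ih]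
    by_cases hx : 'X' ∈ e.toList
    · simp [aLoop, bHolds, hx]
    · rw [aLoop, bHolds, if_neg hx, if_neg hx]
      cases h : PySem.Chars.splitOn e.toList [' '] with
      | nil => simp
      | cons n1 t1 =>
        cases t1 with
        | nil => simp
        | cons op t2 =>
          cases t2 with
          | nil => simp
          | cons n2 t3 =>
            cases t3 with
            | nil => simp
            | cons eqs t4 =>
              cases t4 with
              | nil => simp
              | cons n3 t5 =>
                cases t5 with
                | cons _ _ => simp
                | nil =>
                  simp only [List.foldl, List.nil_append, List.cons_append,
                    PySem.List.pyGet?, PySem.List.pyIdx?]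
                  rw [bCheck_eq]
                  simp only [aNumBase_eq_hv]
                  by_cases hp : op == ['+']
                  · by_cases he : hv base n1 + hv base n2 = hv base n3 <;>
                      simp_all
                  · by_cases hm : op == ['-']
                    · by_cases he : hv base n1 - hv base n2 = hv base n3 <;>
                        simp_all
                    · simp [hp, hm]

-- ===== VERDICT (by name: the statement is the Claim_ definition above) =====
theorem is_working_spec : Claim_equal_is_working := by
  intro base expressions _ _
  unfold Spec_is_working is_working is_working_alt
  exact loop_eq base expressions
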